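-- pv_equiv track=rewrite | github.com/fazeelkhalid/artificial-intelligence-real-life-problem-and-solutions | Lab8/Q2.py | calculate_fitness_left
-- ===== SOURCE A (Python) =====
-- def calculate_fitness_left(point, arr):
--     row = point[0]
--     col = point[1]
--     count = 0
--     for i in range(col - 1, -1, -1):
--         if (row, i) in arr:
--             count = count + 1
--     return count
-- ===== SOURCE B (Python) =====
-- def calculate_fitness_left(point, arr):
--     row = point[0]
--     col = point[1]
--     cols = {e[1] for e in arr if e[0] == row and 0 <= e[1] < col}
--     return len(cols)
-- ===== Notes on version B (the rewrite author's own statement) =====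
-- stated objective: faster
-- what changed: Replaces the probe of every index in range(col-1,-1,-1) with a membership test against arr by a single pass over arr collecting qualifying column values into a set and returning its size.
import Mathlib
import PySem

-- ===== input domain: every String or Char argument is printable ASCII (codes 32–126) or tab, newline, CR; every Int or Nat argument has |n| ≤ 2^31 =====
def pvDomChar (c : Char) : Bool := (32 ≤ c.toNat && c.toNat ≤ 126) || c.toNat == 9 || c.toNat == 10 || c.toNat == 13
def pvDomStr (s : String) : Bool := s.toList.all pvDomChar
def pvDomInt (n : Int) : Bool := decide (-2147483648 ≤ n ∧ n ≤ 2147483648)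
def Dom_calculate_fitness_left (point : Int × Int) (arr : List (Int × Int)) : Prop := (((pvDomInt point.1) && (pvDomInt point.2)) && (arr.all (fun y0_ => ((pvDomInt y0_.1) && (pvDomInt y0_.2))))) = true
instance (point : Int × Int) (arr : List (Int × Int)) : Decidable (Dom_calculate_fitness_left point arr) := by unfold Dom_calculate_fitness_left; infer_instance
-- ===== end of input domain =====

-- B replaces A's scan of every index in range(col-1,-1,-1) (each with a membership
-- test over arr) by one pass over arr collecting qualifying columns into a set.

-- ===== PORT A =====
def calculate_fitness_left (point : Int × Int) (arr : List (Int × Int)) : Int :=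
  let row := point.1
  let col := point.2
  let count : Int := 0
  let count := (PySem.List.pyRange (col - 1) (-1) (-1)).foldl
    (fun count i => if (row, i) ∈ arr then count + 1 else count) count
  count

-- ===== PORT B =====
def calculate_fitness_left_alt (point : Int × Int) (arr : List (Int × Int)) : Int :=
  let row := point.1
  let col := point.2
  let cols : PySem.Set Int :=
    PySem.Set.ofList ((arr.filter
      (fun e => e.1 == row && decide (0 ≤ e.2) && decide (e.2 < col))).map (fun e => e.2))
  PySem.Set.len cols

-- ===== PRECONDITION & SPEC =====
def Spec_calculate_fitness_left (point : Int × Int) (arr : List (Int × Int)) (out : Int) : Prop := out = calculate_fitness_left_alt point arr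
instance (point : Int × Int) (arr : List (Int × Int)) (out : Int) : Decidable (Spec_calculate_fitness_left point arr out) := by unfold Spec_calculate_fitness_left; infer_instance

-- ===== CLAIM (what is proved, stated in full; the proofs are below) =====
def Claim_equal_calculate_fitness_left : Prop := ∀ (point : Int × Int) (arr : List (Int × Int)), Dom_calculate_fitness_left point arr → Spec_calculate_fitness_left point arr (calculate_fitness_left point arr)

-- ===== LEMMAS AND PROOFS =====

-- A's counting loop is list.countP.
theorem foldl_count_eq_countP (p : Int → Prop) [DecidablePred p] (l : List Int) (acc : Int) :
    l.foldl (fun c i => if p i then c + 1 else c) acc = acc + l.countP (fun i => decide (p i)) := by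
  induction l generalizing acc with
  | nil => simp
  | cons x xs ih =>
    simp only [List.foldl_cons, List.countP_cons, ih]
    by_cases h : p x <;> simp [h] <;> ring

-- Two nodup lists with the same membership have the same length.
theorem length_eq_of_nodup_of_mem_iff (l₁ l₂ : List Int) (h₁ : l₁.Nodup) (h₂ : l₂.Nodup)
    (hm : ∀ x, x ∈ l₁ ↔ x ∈ l₂) : l₁.length = l₂.length := by
  have : l₁.toFinset = l₂.toFinset := by
    ext x; simp [List.mem_toFinset, hm]
  calc l₁.length = l₁.toFinset.card := (List.toFinset_card_of_nodup h₁).symm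
    _ = l₂.toFinset.card := by rw [this]
    _ = l₂.length := List.toFinset_card_of_nodup h₂

theorem calculate_fitness_left_spec : Claim_equal_calculate_fitness_left := by
  intro point arr _
  unfold Spec_calculate_fitness_left calculate_fitness_left calculate_fitness_left_alt
  simp only []
  set row := point.1
  set col := point.2
  -- A's loop range: range(col-1, -1, -1) = reverse of range(0, col)
  have hrev : PySem.List.pyRange (col - 1) (-1) (-1) = (PySem.List.pyRange 0 col 1).reverse := by
    have := PySem.List.pyRange_neg_one_eq_reverse (col - 1) (-1)
    simpa using this
  rw [hrev, foldl_count_eq_countP (fun i => (row, i) ∈ arr), List.countP_reverse, zero_add,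
    List.countP_eq_length_filter]
  -- name the two nodup lists
  set S := (PySem.List.pyRange 0 col 1).filter (fun i => decide ((row, i) ∈ arr)) with hS
  set L := (arr.filter
      (fun e => e.1 == row && decide (0 ≤ e.2) && decide (e.2 < col))).map (fun e => e.2) with hL
  have hlen : S.length = (PySem.Set.ofList L).length := by
    apply length_eq_of_nodup_of_mem_iff
    · exact List.Nodup.filter _ (PySem.List.nodup_pyRange_one 0 col)
    · exact PySem.Set.nodup_ofList L
    · intro x
      rw [PySem.Set.mem_ofList]
      constructor
      · intro hx
        rw [hS, List.mem_filter, PySem.List.mem_pyRange_one] at hx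
        obtain ⟨⟨hx0, hxc⟩, hmem⟩ := hx
        simp only [decide_eq_true_eq] at hmem
        rw [hL, List.mem_map]
        exact ⟨(row, x), by simp [List.mem_filter, hmem, hx0, hxc]⟩
      · intro hx
        rw [hL, List.mem_map] at hx
        obtain ⟨e, he, hex⟩ := hx
        rw [List.mem_filter] at he
        obtain ⟨hmem, hcond⟩ := he
        simp only [Bool.and_eq_true, beq_iff_eq, decide_eq_true_eq] at hcond
        obtain ⟨⟨her, he0⟩, hec⟩ := hcond
        rw [hS, List.mem_filter, PySem.List.mem_pyRange_one]
        refine ⟨⟨by omega, by omega⟩, ?_⟩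
        simp only [decide_eq_true_eq]
        have : e = (row, x) := by
          cases e; simp_all
        rwa [this] at hmem
  simp [PySem.Set.len, hlen]

-- ===== VERDICT (by name: the statement is the Claim_ definition above) =====
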